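-- pv_equiv track=rewrite | github.com/gaurav-S8/Supervised-CCT-ECG-Segmentation | data.py | isValidAnnotationFormat
-- ===== SOURCE A (Python) =====
-- def isValidAnnotationFormat(annSymbols):
--     """
--     Checks if annotation symbols follow the expected format: (wave)
--     wave ∈ {'p', 'N', 't'}
--     """
--     waves = {'p', 'N', 't'}
--     if len(annSymbols) % 3 != 0:
--         return False
--
--     for i in range(0, len(annSymbols), 3):
--         if annSymbols[i] != '(' or annSymbols[i+1] not in waves or annSymbols[i+2] != ')':
--             return False
--     return True
-- ===== SOURCE B (Python) =====
-- def isValidAnnotationFormat(annSymbols):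
--     if len(annSymbols) % 3 != 0:
--         return False
--     expected = {0: {'('}, 1: {'p', 'N', 't'}, 2: {')'}}
--     return all(s in expected[i % 3] for i, s in enumerate(annSymbols))
-- ===== Notes on version B (the rewrite author's own statement) =====
-- stated objective: alternative
-- what changed: B never chunks the sequence into triplets: instead of A's range(0,len,3) loop probing positions i, i+1, i+2, B builds a table keyed by position residue mod 3 and makes one flat enumerate pass checking each element against the allowed set for its residue class.
import Mathlib
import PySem

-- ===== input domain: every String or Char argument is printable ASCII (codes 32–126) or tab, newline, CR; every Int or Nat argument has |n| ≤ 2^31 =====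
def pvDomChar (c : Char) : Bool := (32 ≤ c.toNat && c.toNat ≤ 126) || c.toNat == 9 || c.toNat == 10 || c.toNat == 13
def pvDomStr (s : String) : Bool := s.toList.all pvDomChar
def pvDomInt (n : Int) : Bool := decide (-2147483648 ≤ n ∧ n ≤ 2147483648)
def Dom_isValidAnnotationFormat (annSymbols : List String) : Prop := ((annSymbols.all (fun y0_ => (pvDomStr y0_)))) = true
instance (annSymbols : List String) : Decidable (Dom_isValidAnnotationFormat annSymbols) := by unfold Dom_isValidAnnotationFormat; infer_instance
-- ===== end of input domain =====

-- B replaces A's triplet loop over range(0,len,3) by one flat enumerate pass checking each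
-- element against a table keyed by its position mod 3; objective: alternative, same cost.

-- ===== PORT A =====
def pvWavesA : PySem.Set String := PySem.Set.ofList ["p", "N", "t"]

-- the 'for i in range(0, len(annSymbols), 3)' loop with its early 'return False'
def pvLoopA (xs : List String) : List Int → Bool
  | [] => true
  | i :: is =>
    if !(PySem.List.pyGet? xs i == some "(")
        || !((PySem.List.pyGet? xs (i + 1)).elim false (fun w => pvWavesA.contains w))
        || !(PySem.List.pyGet? xs (i + 2) == some ")") then false
    else pvLoopA xs is

def isValidAnnotationFormat (annSymbols : List String) : Bool :=
  if PySem.Int.mod (annSymbols.length : Int) 3 ≠ 0 then false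
  else pvLoopA annSymbols (PySem.List.pyRange 0 (annSymbols.length : Int) 3)

-- ===== PORT B =====
-- the dict literal {0: {'('}, 1: {'p','N','t'}, 2: {')'}}
def pvExpectedB : PySem.Dict Int (PySem.Set String) :=
  ((PySem.Dict.empty.insert 0 (PySem.Set.ofList ["("])).insert 1
      (PySem.Set.ofList ["p", "N", "t"])).insert 2 (PySem.Set.ofList [")"])

-- 's in expected[i % 3]' for one (i, s) pair (KeyError would be .elim's false branch)
def pvCheckB (p : Int × String) : Bool :=
  (pvExpectedB.get? (PySem.Int.mod p.1 3)).elim false (fun S => S.contains p.2)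

def isValidAnnotationFormat_alt (annSymbols : List String) : Bool :=
  if PySem.Int.mod (annSymbols.length : Int) 3 ≠ 0 then false
  else (PySem.List.enumerate annSymbols).all pvCheckB

-- ===== PRECONDITION & SPEC =====
def Spec_isValidAnnotationFormat (annSymbols : List String) (out : Bool) : Prop := out = isValidAnnotationFormat_alt annSymbols
instance (annSymbols : List String) (out : Bool) : Decidable (Spec_isValidAnnotationFormat annSymbols out) := by unfold Spec_isValidAnnotationFormat; infer_instance

-- ===== CLAIM (what is proved, stated in full; the proofs are below) =====
def Claim_equal_isValidAnnotationFormat : Prop := ∀ (annSymbols : List String), Dom_isValidAnnotationFormat annSymbols → Spec_isValidAnnotationFormat annSymbols (isValidAnnotationFormat annSymbols)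

-- ===== LEMMAS AND PROOFS =====

theorem pv_waves_eq : pvWavesA = ["p", "N", "t"] := by decide

theorem pv_get_cons (x : String) (xs : List String) (i : Int) (h : 0 ≤ i) :
    PySem.List.pyGet? (x :: xs) (i + 1) = PySem.List.pyGet? xs i := by
  obtain ⟨n, rfl⟩ := Int.eq_ofNat_of_zero_le h
  have h1 : ((n : Int) + 1) = ((n + 1 : Nat) : Int) := by push_cast; ring
  rw [h1, PySem.List.pyGet?_natCast, PySem.List.pyGet?_natCast]
  simp

theorem pv_get_cons3 (a w c : String) (rest : List String) (i : Int) (h : 0 ≤ i) :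
    PySem.List.pyGet? (a :: w :: c :: rest) (i + 3) = PySem.List.pyGet? rest i := by
  have h1 : i + 3 = (i + 1 + 1) + 1 := by ring
  rw [h1, pv_get_cons _ _ _ (by omega), pv_get_cons _ _ _ (by omega), pv_get_cons _ _ _ h]

theorem pv_loop_shift (a w c : String) (rest : List String) :
    ∀ (is : List Int), (∀ i ∈ is, 0 ≤ i) →
      pvLoopA (a :: w :: c :: rest) (is.map (· + 3)) = pvLoopA rest is := by
  intro is
  induction is with
  | nil => intro _; rfl
  | cons i is ih =>
    intro h
    have hi : 0 ≤ i := h i (by simp)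
    have e1 : i + 3 + 1 = (i + 1) + 3 := by ring
    have e2 : i + 3 + 2 = (i + 2) + 3 := by ring
    simp only [List.map_cons, pvLoopA, e1, e2,
      pv_get_cons3 _ _ _ _ _ hi, pv_get_cons3 _ _ _ _ _ (by omega : (0:Int) ≤ i + 1),
      pv_get_cons3 _ _ _ _ _ (by omega : (0:Int) ≤ i + 2)]
    rw [ih (fun j hj => h j (by simp [hj]))]

theorem pv_range3_cons (m : Nat) :
    PySem.List.pyRange 0 ((m : Int) + 3) 3 = 0 :: (PySem.List.pyRange 0 (m : Int) 3).map (· + 3) := by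
  rw [PySem.List.pyRange_of_pos _ _ (by norm_num), PySem.List.pyRange_of_pos _ _ (by norm_num)]
  have hc : (if (0 : Int) < (m : Int) + 3 then (((m : Int) + 3 - 0 + 3 - 1) / 3).toNat else 0)
      = (if (0 : Int) < (m : Int) then (((m : Int) - 0 + 3 - 1) / 3).toNat else 0) + 1 := by
    split_ifs <;> omega
  rw [hc, List.range_succ_eq_map, List.map_cons, List.map_map, List.map_map]
  refine congrArg₂ _ (by norm_num) ?_
  refine List.map_congr_left ?_
  intro k _
  simp only [Function.comp]
  push_cast
  ring

theorem pv_mod_add3 (x : Int) : PySem.Int.mod (x + 3) 3 = PySem.Int.mod x 3 := by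
  simp only [PySem.Int.mod, Int.fmod_eq_emod]
  omega

-- the enumerate pass only reads indices mod 3, so shifting the start by 3 changes nothing
theorem pv_all_shift (xs : List String) :
    ∀ (s : Int), (PySem.List.enumerate xs (s + 3)).all pvCheckB
      = (PySem.List.enumerate xs s).all pvCheckB := by
  induction xs with
  | nil => intro s; simp [PySem.List.enumerate_nil]
  | cons x xs ih =>
    intro s
    rw [PySem.List.enumerate_cons, PySem.List.enumerate_cons, List.all_cons, List.all_cons]
    have hp : pvCheckB (s + 3, x) = pvCheckB (s, x) := by
      simp only [pvCheckB, pv_mod_add3]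
    have e : s + 3 + 1 = (s + 1) + 3 := by ring
    rw [hp, e, ih (s + 1)]

theorem pv_bool_shape (x y z L : Bool) :
    (if !x || !y || !z then false else L) = (x && (y && (z && L))) := by
  cases x <;> cases y <;> cases z <;> simp

theorem pv_contains_open (a : String) : (PySem.Set.ofList ["("]).contains a = (a == "(") := by
  have h : PySem.Set.ofList ["("] = ["("] := by decide
  rw [h]; show List.contains ["("] a = _
  simp only [List.contains_cons, List.contains_nil, Bool.or_false]

theorem pv_contains_close (c : String) : (PySem.Set.ofList [")"]).contains c = (c == ")") := by
  have h : PySem.Set.ofList [")"] = [")"] := by decide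
  rw [h]; show List.contains [")"] c = _
  simp only [List.contains_cons, List.contains_nil, Bool.or_false]

theorem pv_contains_waves (w : String) :
    (PySem.Set.ofList ["p", "N", "t"]).contains w = (w == "p" || w == "N" || w == "t") := by
  have h : PySem.Set.ofList ["p", "N", "t"] = ["p", "N", "t"] := by decide
  rw [h]; show List.contains ["p", "N", "t"] w = _
  simp only [List.contains_cons, List.contains_nil, Bool.or_false, Bool.or_assoc]

theorem pv_check0 (a : String) : pvCheckB (0, a) = (a == "(") := by
  have h : pvExpectedB.get? (PySem.Int.mod 0 3) = some (PySem.Set.ofList ["("]) := by decide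
  simp only [pvCheckB, h, Option.elim, pv_contains_open]

theorem pv_check1 (w : String) : pvCheckB (1, w) = (w == "p" || w == "N" || w == "t") := by
  have h : pvExpectedB.get? (PySem.Int.mod 1 3) = some (PySem.Set.ofList ["p", "N", "t"]) := by
    decide
  simp only [pvCheckB, h, Option.elim, pv_contains_waves]

theorem pv_check2 (c : String) : pvCheckB (2, c) = (c == ")") := by
  have h : pvExpectedB.get? (PySem.Int.mod 2 3) = some (PySem.Set.ofList [")"]) := by decide
  simp only [pvCheckB, h, Option.elim, pv_contains_close]

theorem pv_main : ∀ (xs : List String), isValidAnnotationFormat xs = isValidAnnotationFormat_alt xs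
  | [] => by
    simp [isValidAnnotationFormat, isValidAnnotationFormat_alt, pvLoopA, PySem.Int.mod,
      PySem.List.pyRange, PySem.List.enumerate_nil]
  | [a] => by
    simp [isValidAnnotationFormat, isValidAnnotationFormat_alt, PySem.Int.mod]
  | [a, b] => by
    simp [isValidAnnotationFormat, isValidAnnotationFormat_alt, PySem.Int.mod]
  | a :: w :: c :: rest => by
    have IH := pv_main rest
    have hlen : (((a :: w :: c :: rest).length : Int)) = (rest.length : Int) + 3 := by
      simp; ring
    have hnn : ∀ i ∈ PySem.List.pyRange 0 ((rest.length : Int)) 3, 0 ≤ i := by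
      intro i hi
      exact ((PySem.List.mem_pyRange_iff_of_pos (by norm_num) i).1 hi).1
    rw [isValidAnnotationFormat, isValidAnnotationFormat_alt, hlen, pv_mod_add3]
    by_cases hm : PySem.Int.mod ((rest.length : Int)) 3 = 0
    · rw [if_neg (by simpa using hm), if_neg (by simpa using hm), pv_range3_cons]
      rw [pvLoopA]
      have g0 : PySem.List.pyGet? (a :: w :: c :: rest) 0 = some a := by
        simp [PySem.List.pyGet?, PySem.List.pyIdx?,
          show (0:Int) ≤ (rest.length:Int) + 1 + 1 by positivity]
      have g1 : PySem.List.pyGet? (a :: w :: c :: rest) ((0 : Int) + 1) = some w := by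
        rw [pv_get_cons _ _ _ (le_refl 0)]
        simp [PySem.List.pyGet?, PySem.List.pyIdx?,
          show (0:Int) ≤ (rest.length:Int) + 1 by positivity]
      have g2 : PySem.List.pyGet? (a :: w :: c :: rest) ((0 : Int) + 2) = some c := by
        have e : (0 : Int) + 2 = 1 + 1 := by ring
        rw [e, pv_get_cons _ _ _ (by omega)]
        have e2 : (1 : Int) = 0 + 1 := by ring
        rw [e2, pv_get_cons _ _ _ (le_refl 0)]
        simp [PySem.List.pyGet?, PySem.List.pyIdx?,
          show (0:Int) ≤ (rest.length:Int) by positivity]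
      rw [g0, g1, g2, pv_loop_shift _ _ _ _ _ hnn]
      have hA : pvLoopA rest (PySem.List.pyRange 0 ((rest.length : Int)) 3)
          = (PySem.List.enumerate rest 0).all pvCheckB := by
        rw [← show isValidAnnotationFormat_alt rest = (PySem.List.enumerate rest 0).all pvCheckB
              from by rw [isValidAnnotationFormat_alt, if_neg (by simpa using hm)],
            ← IH, isValidAnnotationFormat, if_neg (by simpa using hm)]
      -- B side: unfold the first three enumerate entries and shift the tail back to start 0
      rw [PySem.List.enumerate_cons, PySem.List.enumerate_cons, PySem.List.enumerate_cons,
        List.all_cons, List.all_cons, List.all_cons]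
      have e3 : (0 : Int) + 1 + 1 + 1 = 0 + 3 := by ring
      rw [e3, pv_all_shift rest 0]
      rw [pv_check0, show ((0 : Int) + 1, w) = ((1 : Int), w) from by norm_num, pv_check1,
        show ((0 : Int) + 1 + 1, c) = ((2 : Int), c) from by norm_num, pv_check2]
      rw [hA, pv_bool_shape]
      simp [pv_waves_eq, Bool.or_assoc, beq_eq_decide]
    · rw [if_pos (by simpa using hm), if_pos (by simpa using hm)]

-- ===== VERDICT (by name: the statement is the Claim_ definition above) =====

theorem isValidAnnotationFormat_spec : Claim_equal_isValidAnnotationFormat := by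
  intro xs _
  unfold Spec_isValidAnnotationFormat; exact pv_main xs
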